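-- pv_equiv track=rewrite | github.com/vhurdaneta/trmnl-currency-plugin | rates_server.py | dedupe_and_sort_history
-- ===== SOURCE A (Python) =====
-- def dedupe_and_sort_history(rows: list) -> list:
--     """Elimina duplicados por date quedándose con el último, y ordena."""
--     dedup = {}
--     for r in rows:
--         key = r.get("date")
--         if key:
--             dedup[key] = r
--     out = list(dedup.values())
--     out.sort(key=lambda x: x.get("date", ""))
--     return out
-- ===== SOURCE B (Python) =====
-- def dedupe_and_sort_history(rows: list) -> list:
--     """Elimina duplicados por date quedandose con el ultimo, y ordena.
--
--     Sort-first strategy: keep rows with a truthy date, stably sort them by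
--     date, then collapse each run of equal dates keeping the run's last row
--     (the last occurrence in the original order, by stability)."""
--     srt = sorted([r for r in rows if r.get("date")], key=lambda r: r.get("date", ""))
--     out = []
--     for r in srt:
--         if out and out[-1].get("date", "") == r.get("date", ""):
--             out[-1] = r
--         else:
--             out.append(r)
--     return out
-- ===== Notes on version B (the rewrite author's own statement) =====
-- stated objective: alternative
-- what changed: Reverses A's phase order: instead of deduping into a dict keyed by date and then sorting the dict's values, B filters rows with a truthy date, stably sorts them by date, and collapses each run of equal dates in one pass keeping the run's last row.
import Mathlib
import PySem

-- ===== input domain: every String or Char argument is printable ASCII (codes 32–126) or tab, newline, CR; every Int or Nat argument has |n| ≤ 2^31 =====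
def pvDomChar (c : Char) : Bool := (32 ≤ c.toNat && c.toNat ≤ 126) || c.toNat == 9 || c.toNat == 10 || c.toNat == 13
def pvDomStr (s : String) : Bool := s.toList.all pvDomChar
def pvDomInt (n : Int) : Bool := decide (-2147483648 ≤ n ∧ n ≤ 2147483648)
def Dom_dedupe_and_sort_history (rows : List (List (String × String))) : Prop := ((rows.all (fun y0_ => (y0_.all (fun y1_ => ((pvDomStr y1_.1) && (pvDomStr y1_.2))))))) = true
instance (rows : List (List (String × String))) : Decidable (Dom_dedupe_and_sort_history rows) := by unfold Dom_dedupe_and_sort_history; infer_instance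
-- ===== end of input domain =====

-- B reverses A's phase order: filter truthy dates, stable-sort by date, collapse runs keeping the last row
-- (alternative decomposition, same O(n log n) cost; neither program mutates `rows`).

-- ===== PORT A =====
-- dict-dedupe keyed by date (last wins), then sort the dict's values by date
def dedupe_and_sort_history (rows : List (List (String × String))) : List (List (String × String)) :=
  let dedup := rows.foldl (fun dedup r =>
    match (PySem.Dict.mk r).get? "date" with       -- key = r.get("date")
    | some key => if key ≠ "" then dedup.insert key r else dedup   -- if key: dedup[key] = r
    | none => dedup) PySem.Dict.empty
  PySem.List.sorted dedup.values (fun x => (PySem.Dict.mk x).getD "date" "") false   -- out.sort(key=...)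

-- ===== PORT B =====
-- filter truthy dates, stable sort by date, collapse equal-date runs keeping the last row of each run
def dedupe_and_sort_history_alt (rows : List (List (String × String))) : List (List (String × String)) :=
  let srt := PySem.List.sorted
    (rows.filter (fun r => match (PySem.Dict.mk r).get? "date" with   -- [r for r in rows if r.get("date")]
      | some k => decide (k ≠ "")
      | none => false))
    (fun r => (PySem.Dict.mk r).getD "date" "") false
  srt.foldl (fun out r =>
    match out.getLast? with                         -- `out and out[-1]…`: out[-1] exists iff out is nonempty
    | some t =>
        if (PySem.Dict.mk t).getD "date" "" == (PySem.Dict.mk r).getD "date" ""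
        then out.dropLast ++ [r]                    -- out[-1] = r
        else out ++ [r]                             -- out.append(r)
    | none => out ++ [r]) []

-- ===== PRECONDITION & SPEC =====
def Spec_dedupe_and_sort_history (rows : List (List (String × String))) (out : List (List (String × String))) : Prop := out = dedupe_and_sort_history_alt rows
instance (rows : List (List (String × String))) (out : List (List (String × String))) : Decidable (Spec_dedupe_and_sort_history rows out) := by unfold Spec_dedupe_and_sort_history; infer_instance

-- ===== CLAIM (what is proved, stated in full; the proofs are below) =====
def Claim_equal_dedupe_and_sort_history : Prop := ∀ (rows : List (List (String × String))), Dom_dedupe_and_sort_history rows → Spec_dedupe_and_sort_history rows (dedupe_and_sort_history rows)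

-- ===== LEMMAS AND PROOFS =====

-- the date key of a row
def pvKey (r : List (String × String)) : String := (PySem.Dict.mk r).getD "date" ""

-- collapse runs of equal keys, keeping the LAST element of each run (structural form of B's loop)
def pvCollapse {α : Type} (key : α → String) : List α → List α
  | [] => []
  | [x] => [x]
  | x :: y :: t => if key x = key y then pvCollapse key (y :: t) else x :: pvCollapse key (y :: t)

-- insert-or-replace into a key-sorted list
def pvUpsert {α : Type} (key : α → String) (r : α) : List α → List α
  | [] => [r]
  | y :: ys => if key r < key y then r :: y :: ys
               else if key r = key y then r :: ys
               else y :: pvUpsert key r ys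

-- A's dict fold, restricted to the kept rows
def pvDictOf {α : Type} (key : α → String) (l : List α) : PySem.Dict String α :=
  l.foldl (fun d r => d.insert (key r) r) PySem.Dict.empty

theorem pvCollapse_ne_nil {α : Type} (key : α → String) (s : List α) (h : s ≠ []) :
    pvCollapse key s ≠ [] := by
  induction s with
  | nil => exact absurd rfl h
  | cons x t ih =>
    cases t with
    | nil => simp [pvCollapse]
    | cons y t' =>
      simp only [pvCollapse]
      split
      · exact ih (by simp)
      · simp

theorem pvCollapse_subset {α : Type} (key : α → String) (s : List α) {z : α}
    (h : z ∈ pvCollapse key s) : z ∈ s := by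
  induction s with
  | nil => simp [pvCollapse] at h
  | cons x t ih =>
    cases t with
    | nil => simpa [pvCollapse] using h
    | cons y t' =>
      simp only [pvCollapse] at h
      split at h
      · exact List.mem_cons_of_mem _ (ih h)
      · rcases List.mem_cons.mp h with h | h
        · simp [h]
        · exact List.mem_cons_of_mem _ (ih h)

theorem pvCollapse_getLast? {α : Type} (key : α → String) (s : List α) :
    (pvCollapse key s).getLast? = s.getLast? := by
  induction s with
  | nil => rfl
  | cons x t ih =>
    cases t with
    | nil => rfl
    | cons y t' =>
      simp only [pvCollapse]
      split
      · rw [ih, List.getLast?_cons_cons]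
      · have hne := pvCollapse_ne_nil key (y :: t') (by simp)
        rcases hc : pvCollapse key (y :: t') with _ | ⟨a, c⟩
        · exact absurd hc hne
        · rw [List.getLast?_cons_cons, ← hc, ih, List.getLast?_cons_cons]

theorem pvUpsert_of_forall_lt {α : Type} (key : α → String) (r : α) (ys : List α)
    (h : ∀ z ∈ ys, key r < key z) : pvUpsert key r ys = r :: ys := by
  cases ys with
  | nil => rfl
  | cons y t => simp [pvUpsert, h y (List.mem_cons_self)]

theorem pvUpsert_mem {α : Type} (key : α → String) (r : α) (ys : List α) {z : α}
    (h : z ∈ pvUpsert key r ys) : z = r ∨ z ∈ ys := by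
  induction ys with
  | nil => simp [pvUpsert] at h; simp [h]
  | cons y t ih =>
    simp only [pvUpsert] at h
    split at h
    · rcases List.mem_cons.mp h with h | h
      · exact Or.inl h
      · exact Or.inr h
    · split at h
      · rcases List.mem_cons.mp h with h | h
        · exact Or.inl h
        · exact Or.inr (List.mem_cons_of_mem _ h)
      · rcases List.mem_cons.mp h with h | h
        · exact Or.inr (by simp [h])
        · rcases ih h with h | h
          · exact Or.inl h
          · exact Or.inr (List.mem_cons_of_mem _ h)

theorem pvUpsert_pairwise_lt {α : Type} (key : α → String) (r : α) (ys : List α)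
    (h : ys.Pairwise (fun a b => key a < key b)) :
    (pvUpsert key r ys).Pairwise (fun a b => key a < key b) := by
  induction ys with
  | nil => simp [pvUpsert]
  | cons y t ih =>
    rcases List.pairwise_cons.mp h with ⟨hy, ht⟩
    simp only [pvUpsert]
    split
    · rename_i hlt
      refine List.pairwise_cons.mpr ⟨?_, h⟩
      intro z hz
      rcases List.mem_cons.mp hz with rfl | hz
      · exact hlt
      · exact lt_trans hlt (hy z hz)
    · split
      · rename_i _ heq
        exact List.pairwise_cons.mpr ⟨fun z hz => heq ▸ hy z hz, ht⟩
      · rename_i hnlt hne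
        refine List.pairwise_cons.mpr ⟨?_, ih ht⟩
        intro z hz
        rcases pvUpsert_mem key r t hz with rfl | hz
        · exact lt_of_le_of_ne (not_lt.mp hnlt) (Ne.symm hne)
        · exact hy z hz

theorem pvUpsert_perm {α : Type} (key : α → String) (r : α) (ys : List α)
    (h : ys.Pairwise (fun a b => key a < key b)) :
    (pvUpsert key r ys).Perm (r :: ys.filter (fun z => key z ≠ key r)) := by
  induction ys with
  | nil => simp [pvUpsert]
  | cons y t ih =>
    rcases List.pairwise_cons.mp h with ⟨hy, ht⟩
    simp only [pvUpsert]
    split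
    · rename_i hlt
      have hfil : (y :: t).filter (fun z => decide (key z ≠ key r)) = y :: t := by
        apply List.filter_eq_self.mpr
        intro z hz
        rcases List.mem_cons.mp hz with rfl | hz
        · simpa using (ne_of_lt hlt).symm
        · simpa using (ne_of_lt (lt_trans hlt (hy z hz))).symm
      rw [hfil]
    · split
      · rename_i _ heq
        have h1 : (decide (key y ≠ key r)) = false := by simp [heq.symm]
        have h2 : t.filter (fun z => decide (key z ≠ key r)) = t := by
          apply List.filter_eq_self.mpr
          intro z hz
          simpa using (ne_of_lt (heq ▸ hy z hz)).symm
        rw [List.filter_cons, h1]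
        simp only [if_neg Bool.false_ne_true, h2]
        exact List.Perm.refl _
      · rename_i hnlt hne
        have h1 : (decide (key y ≠ key r)) = true := by
          simpa using fun hh => hne hh.symm
        rw [List.filter_cons, h1]
        exact ((ih ht).cons y).trans (List.Perm.swap r y _)

-- collapsing after an orderly insertion = upsert after collapsing
theorem pvCollapse_insertBy {α : Type} (key : α → String) (r : α) (s : List α)
    (h : s.Pairwise (fun a b => key a ≤ key b)) :
    pvCollapse key (PySem.List.insertBy (fun a b => decide (key a < key b)) r s)
      = pvUpsert key r (pvCollapse key s) := by
  induction s with
  | nil => rfl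
  | cons x t ih =>
    rcases List.pairwise_cons.mp h with ⟨hx, ht⟩
    cases t with
    | nil =>
      show pvCollapse key (if decide (key r < key x) then _ else _) = _
      by_cases h1 : key r < key x
      · rw [if_pos (by simpa using h1)]
        show pvCollapse key [r, x] = _
        simp only [pvCollapse, pvUpsert]
        rw [if_neg (ne_of_lt h1), if_pos h1]
      · rw [if_neg (by simpa using h1)]
        show pvCollapse key [x, r] = _
        by_cases h2 : key r = key x
        · simp only [pvCollapse, pvUpsert]
          rw [if_pos h2.symm, if_neg h1, if_pos h2]
        · simp only [pvCollapse, pvUpsert]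
          rw [if_neg (fun hh => h2 hh.symm), if_neg h1, if_neg h2]
    | cons y t' =>
      have hxy : key x ≤ key y := hx y List.mem_cons_self
      rcases List.pairwise_cons.mp ht with ⟨hy, ht'⟩
      show pvCollapse key (if decide (key r < key x) then _ else _) = _
      by_cases h1 : key r < key x
      · rw [if_pos (by simpa using h1)]
        have hcoll : ∀ z ∈ pvCollapse key (x :: y :: t'), key r < key z := by
          intro z hz
          rcases List.mem_cons.mp (pvCollapse_subset key _ hz) with rfl | hz'
          · exact h1
          · exact lt_of_lt_of_le h1 (hx z hz')
        rw [pvUpsert_of_forall_lt key r _ hcoll]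
        show pvCollapse key (r :: x :: y :: t') = _
        simp only [pvCollapse]
        rw [if_neg (ne_of_lt h1)]
      · rw [if_neg (by simpa using h1)]
        have hxr : key x ≤ key r := not_lt.mp h1
        by_cases h2 : key r < key y
        · have hins : PySem.List.insertBy (fun a b => decide (key a < key b)) r (y :: t') = r :: y :: t' := by
            show (if decide (key r < key y) then _ else _) = _
            rw [if_pos (by simpa using h2)]
          rw [hins]
          have hne_xy : key x ≠ key y := by
            intro he
            exact absurd (h2.trans_le (he ▸ hxr)) (lt_irrefl _)
          have hCx : pvCollapse key (x :: y :: t') = x :: pvCollapse key (y :: t') := by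
            simp only [pvCollapse]
            rw [if_neg hne_xy]
          have hcoll' : pvUpsert key r (pvCollapse key (y :: t')) = r :: pvCollapse key (y :: t') := by
            apply pvUpsert_of_forall_lt
            intro z hz
            rcases List.mem_cons.mp (pvCollapse_subset key _ hz) with rfl | hz'
            · exact h2
            · exact lt_of_lt_of_le h2 (hy z hz')
          rw [hCx]
          by_cases h3 : key x = key r
          · show pvCollapse key (x :: r :: y :: t') = _
            simp only [pvCollapse, pvUpsert]
            rw [if_pos h3, if_neg (ne_of_lt h2), if_neg h1, if_pos h3.symm]
          · show pvCollapse key (x :: r :: y :: t') = _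
            simp only [pvCollapse, pvUpsert]
            rw [if_neg h3, if_neg (ne_of_lt h2), if_neg h1, if_neg (fun hh => h3 hh.symm), hcoll']
        · have hins2 : PySem.List.insertBy (fun a b => decide (key a < key b)) r (y :: t') = y :: PySem.List.insertBy (fun a b => decide (key a < key b)) r t' := by
            show (if decide (key r < key y) then _ else _) = _
            rw [if_neg (by simpa using h2)]
          have hkey : pvCollapse key (y :: PySem.List.insertBy (fun a b => decide (key a < key b)) r t') = pvUpsert key r (pvCollapse key (y :: t')) := by
            rw [← hins2, ih ht]
          by_cases h4 : key x = key y
          · have hCx : pvCollapse key (x :: y :: t') = pvCollapse key (y :: t') := by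
              simp only [pvCollapse]
              rw [if_pos h4]
            rw [hins2, hCx]
            show pvCollapse key (x :: y :: _) = _
            simp only [pvCollapse]
            rw [if_pos h4]
            -- goal is now collapse (y :: insertBy r t') = upsert r (collapse (y::t'))
            exact hkey
          · have hCx : pvCollapse key (x :: y :: t') = x :: pvCollapse key (y :: t') := by
              simp only [pvCollapse]
              rw [if_neg h4]
            rw [hins2, hCx]
            show pvCollapse key (x :: y :: _) = _
            simp only [pvCollapse]
            rw [if_neg h4]
            have h5 : key r ≠ key x := by
              intro he
              exact h2 (by rw [he]; exact lt_of_le_of_ne hxy h4)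
            simp only [pvUpsert]
            rw [if_neg h1, if_neg h5, hkey]

-- replacing the (unique) entry of a given key in an items list, as a multiset
theorem pvItems_replace_perm {α : Type} (key : α → String) (r : α) (items : List (String × α))
    (hnd : (items.map Prod.fst).Nodup) (h2 : ∀ p ∈ items, key p.2 = p.1)
    (hc : key r ∈ items.map Prod.fst) :
    ((items.map (fun p => if p.1 == key r then (key r, r) else p)).map Prod.snd).Perm
      (r :: (items.map Prod.snd).filter (fun z => key z ≠ key r)) := by
  induction items with
  | nil => simp at hc
  | cons q rest ih =>
    obtain ⟨k0, v⟩ := q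
    simp only [List.map_cons, List.nodup_cons] at hnd
    have hkv : key v = k0 := h2 (k0, v) List.mem_cons_self
    by_cases hk : k0 = key r
    · have hrest : rest.map (fun p => if p.1 == key r then (key r, r) else p) = rest := by
        have h := List.map_congr_left (l := rest)
          (g := fun p : String × α => p) (f := fun p => if p.1 == key r then (key r, r) else p)
          (fun p hp => by
            have hne : p.1 ≠ key r := fun he =>
              hnd.1 (by rw [hk, ← he]; exact List.mem_map_of_mem (f := Prod.fst) hp)
            simp [hne])
        rw [h, List.map_id']
      have hfil : (rest.map Prod.snd).filter (fun z => key z ≠ key r) = rest.map Prod.snd := by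
        apply List.filter_eq_self.mpr
        intro z hz
        rcases List.mem_map.mp hz with ⟨p, hp, rfl⟩
        have hne : p.1 ≠ key r := fun he =>
          hnd.1 (by rw [hk, ← he]; exact List.mem_map_of_mem (f := Prod.fst) hp)
        have hkp : key p.2 = p.1 := h2 p (List.mem_cons_of_mem _ hp)
        simp [hkp, hne]
      simp only [List.map_cons, List.filter_cons, hrest]
      rw [if_pos (by simpa using hk)]
      have : (decide (key v ≠ key r)) = false := by simp [hkv, hk]
      rw [this]
      simp only [Bool.false_eq_true, if_neg (by simp : ¬False)]
      rw [hfil]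
    · have hc' : key r ∈ rest.map Prod.fst := by
        rcases List.mem_cons.mp hc with he | he
        · exact absurd he.symm hk
        · exact he
      simp only [List.map_cons, List.filter_cons]
      rw [if_neg (by simpa using hk)]
      have : (decide (key v ≠ key r)) = true := by simp [hkv]; exact hk
      rw [this]
      exact ((ih hnd.2 (fun p hp => h2 p (List.mem_cons_of_mem _ hp)) hc').cons v).trans
        (List.Perm.swap r v _)

-- values of the dict after an insert, as a multiset
theorem pvDict_insert_values_perm {α : Type} (key : α → String) (r : α)
    (d : PySem.Dict String α) (h1 : d.keys.Nodup) (h2 : ∀ p ∈ d.items, key p.2 = p.1) :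
    ((d.insert (key r) r).values).Perm (r :: d.values.filter (fun z => key z ≠ key r)) := by
  by_cases hc : d.contains (key r)
  · have hitems := PySem.Dict.items_insert_of_contains d r hc
    have hmem : key r ∈ d.items.map Prod.fst := (PySem.Dict.contains_iff_mem_keys d (key r)).mp hc
    show ((d.insert (key r) r).items.map Prod.snd).Perm _
    rw [hitems]
    exact pvItems_replace_perm key r d.items h1 h2 hmem
  · have hitems := PySem.Dict.items_insert_of_not_contains d r (by simpa using hc)
    have hfil : d.values.filter (fun z => key z ≠ key r) = d.values := by
      apply List.filter_eq_self.mpr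
      intro z hz
      rcases List.mem_map.mp hz with ⟨p, hp, rfl⟩
      have hne : p.1 ≠ key r := by
        intro he
        exact hc ((PySem.Dict.contains_iff_mem_keys d (key r)).mpr (he ▸ List.mem_map_of_mem hp))
      simpa using (h2 p hp).symm ▸ hne
    rw [hfil]
    show ((d.insert (key r) r).items.map Prod.snd).Perm _
    rw [hitems, List.map_append]
    exact List.perm_append_singleton r _

theorem pvSorted_values_pairwise_lt {α : Type} (key : α → String)
    (d : PySem.Dict String α) (h1 : d.keys.Nodup) (h2 : ∀ p ∈ d.items, key p.2 = p.1) :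
    (PySem.List.sorted d.values key false).Pairwise (fun a b => key a < key b) := by
  have hle := PySem.List.sorted_pairwise d.values key
  have hmapkeys : d.values.map key = d.keys := by
    show (d.items.map Prod.snd).map key = d.items.map Prod.fst
    rw [List.map_map]
    exact List.map_congr_left (fun p hp => h2 p hp)
  have hnd : ((PySem.List.sorted d.values key false).map key).Nodup := by
    have hperm : ((PySem.List.sorted d.values key false).map key).Perm d.keys := by
      rw [← hmapkeys]
      exact (PySem.List.sorted_perm d.values key false).map key
    exact hperm.nodup_iff.mpr h1
  have hne : (PySem.List.sorted d.values key false).Pairwise (fun a b => key a ≠ key b) :=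
    List.pairwise_map.mp hnd
  exact (hle.and hne).imp (fun hab => lt_of_le_of_ne hab.1 hab.2)

-- MAIN (with the dict invariant carried through the fold)
theorem pvMain_aux {α : Type} (key : α → String) (l : List α) :
    ((pvDictOf key l).keys.Nodup ∧ ∀ p ∈ (pvDictOf key l).items, key p.2 = p.1) ∧
      pvCollapse key (PySem.List.sorted l key false)
        = PySem.List.sorted (pvDictOf key l).values key false := by
  induction l using List.reverseRecOn with
  | nil =>
    refine ⟨⟨PySem.Dict.nodup_keys_empty, ?_⟩, rfl⟩
    intro p hp
    simp [pvDictOf, PySem.Dict.empty] at hp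
  | append_singleton l r ih =>
    obtain ⟨⟨hnd, hinv⟩, heq⟩ := ih
    have hdict : pvDictOf key (l ++ [r]) = (pvDictOf key l).insert (key r) r := by
      simp [pvDictOf, List.foldl_append]
    have hnd' : (pvDictOf key (l ++ [r])).keys.Nodup := by
      rw [hdict]; exact PySem.Dict.nodup_keys_insert _ _ _ hnd
    have hinv' : ∀ p ∈ (pvDictOf key (l ++ [r])).items, key p.2 = p.1 := by
      rw [hdict]
      intro p hp
      rcases (PySem.Dict.mem_items_insert _ _ _ p).mp hp with rfl | ⟨hp', _⟩
      · rfl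
      · exact hinv p hp'
    refine ⟨⟨hnd', hinv'⟩, ?_⟩
    have hsorted : PySem.List.sorted (l ++ [r]) key false
        = PySem.List.insertBy (fun a b => decide (key a < key b)) r (PySem.List.sorted l key false) := by
      rw [PySem.List.sorted_eq_foldl_insertBy, List.foldl_append, ← PySem.List.sorted_eq_foldl_insertBy]
      rfl
    rw [hsorted, pvCollapse_insertBy key r _ (PySem.List.sorted_pairwise l key), heq, hdict]
    have hlt := pvSorted_values_pairwise_lt key (pvDictOf key l) hnd hinv
    refine (PySem.List.sorted_eq_of_perm_of_pairwise_lt _ _ _ ?_ (pvUpsert_pairwise_lt key r _ hlt)).symm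
    exact ((pvUpsert_perm key r _ hlt).trans
      (((PySem.List.sorted_perm (pvDictOf key l).values key false).filter _).cons r)).trans
      (pvDict_insert_values_perm key r _ hnd hinv).symm

-- MAIN: collapse-after-sort = sort of the dedupe-dict's values
theorem pvMain {α : Type} (key : α → String) (l : List α) :
    pvCollapse key (PySem.List.sorted l key false)
      = PySem.List.sorted (pvDictOf key l).values key false := by
  exact (pvMain_aux key l).2

-- appending one element to the scanned list, in terms of the last element
theorem pvCollapse_append {α : Type} (key : α → String) (s : List α) {t : α}
    (ht : s.getLast? = some t) (r : α) :
    pvCollapse key (s ++ [r])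
      = if key t = key r then (pvCollapse key s).dropLast ++ [r]
        else pvCollapse key s ++ [r] := by
  induction s with
  | nil => simp at ht
  | cons x t' ih =>
    cases t' with
    | nil =>
      have hx : t = x := by simpa using ht.symm
      rw [hx]
      show pvCollapse key [x, r] = _
      simp only [pvCollapse]
      by_cases h : key x = key r
      · rw [if_pos h, if_pos h]
        rfl
      · rw [if_neg h, if_neg h]
        rfl
    | cons y t'' =>
      have ht' : (y :: t'').getLast? = some t := by
        have h := ht
        rw [List.getLast?_cons_cons] at h
        exact h
      have hC : pvCollapse key (y :: t'') ≠ [] := pvCollapse_ne_nil key _ (by simp)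
      show pvCollapse key (x :: y :: (t'' ++ [r])) = _
      simp only [pvCollapse]
      by_cases h4 : key x = key y
      · rw [if_pos h4, if_pos h4]
        show pvCollapse key ((y :: t'') ++ [r]) = _
        rw [ih ht']
      · rw [if_neg h4, if_neg h4]
        show x :: pvCollapse key ((y :: t'') ++ [r]) = _
        rw [ih ht']
        by_cases h5 : key t = key r
        · rw [if_pos h5, if_pos h5, List.dropLast_cons_of_ne_nil hC]
          rfl
        · rw [if_neg h5, if_neg h5]
          rfl

-- B's foldl loop computes pvCollapse
theorem pvFold_eq_collapse (s : List (List (String × String))) :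
    s.foldl (fun out r =>
      match out.getLast? with
      | some t =>
          if (PySem.Dict.mk t).getD "date" "" == (PySem.Dict.mk r).getD "date" ""
          then out.dropLast ++ [r] else out ++ [r]
      | none => out ++ [r]) []
    = pvCollapse pvKey s := by
  induction s using List.reverseRecOn with
  | nil => rfl
  | append_singleton s r ih =>
    rw [List.foldl_append, ih]
    rcases hs : s.getLast? with _ | t
    · have hsnil : s = [] := List.getLast?_eq_none_iff.mp hs
      subst hsnil
      rfl
    · have hlast : (pvCollapse pvKey s).getLast? = some t := by
        rw [pvCollapse_getLast? pvKey s, hs]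
      show (match (pvCollapse pvKey s).getLast? with
        | some t =>
            if (PySem.Dict.mk t).getD "date" "" == (PySem.Dict.mk r).getD "date" ""
            then (pvCollapse pvKey s).dropLast ++ [r] else pvCollapse pvKey s ++ [r]
        | none => pvCollapse pvKey s ++ [r]) = _
      rw [hlast, pvCollapse_append pvKey s hs r]
      show (if ((PySem.Dict.mk t).getD "date" "" == (PySem.Dict.mk r).getD "date" "") = true
            then (pvCollapse pvKey s).dropLast ++ [r] else pvCollapse pvKey s ++ [r]) = _
      by_cases hk : pvKey t = pvKey r
      · rw [if_pos hk]
        have hb : ((PySem.Dict.mk t).getD "date" "" == (PySem.Dict.mk r).getD "date" "") = true := by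
          simpa [pvKey] using hk
        rw [hb]
        rfl
      · rw [if_neg hk]
        have hb : ((PySem.Dict.mk t).getD "date" "" == (PySem.Dict.mk r).getD "date" "") = false := by
          simpa [pvKey] using hk
        rw [hb]
        simp

-- ===== VERDICT (by name: the statement is the Claim_ definition above) =====
theorem dedupe_and_sort_history_spec : Claim_equal_dedupe_and_sort_history := by
  intro rows _
  show dedupe_and_sort_history rows = dedupe_and_sort_history_alt rows
  unfold dedupe_and_sort_history dedupe_and_sort_history_alt
  simp only []
  have hstep : ∀ (d : PySem.Dict String (List (String × String))) (r : List (String × String)),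
      (match (PySem.Dict.mk r).get? "date" with
        | some key => if key ≠ "" then d.insert key r else d
        | none => d)
      = if (match (PySem.Dict.mk r).get? "date" with
              | some k => decide (k ≠ "")
              | none => false)
        then d.insert (pvKey r) r else d := by
    intro d r
    rcases hg : (PySem.Dict.mk r).get? "date" with _ | k
    · simp
    · have hk : pvKey r = k := by
        simp [pvKey, PySem.Dict.getD_eq_get?_getD, hg]
      by_cases hne : k = ""
      · simp [hne]
      · simp [hne, hk]
  rw [PySem.List.foldl_congr_mem rows _
    (fun d r => if (match (PySem.Dict.mk r).get? "date" with
        | some k => decide (k ≠ "")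
        | none => false)
      then d.insert (pvKey r) r else d) PySem.Dict.empty
    (fun acc x _ => hstep acc x)]
  rw [PySem.List.foldl_if_eq_foldl_filter]
  show PySem.List.sorted (pvDictOf pvKey (rows.filter _)).values pvKey false = _
  rw [← pvMain pvKey]
  exact (pvFold_eq_collapse _).symm
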